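-- pv_equiv track=rewrite | github.com/prakashpgh/worldrunsoncode | problem_solving/stack/py/monotonous_stack/previous_greater_element.py | previous_greater_element_brute_force
-- ===== SOURCE A (Python) =====
-- def previous_greater_element_brute_force(nums:list[int]) -> list[int]:
--     n = len(nums)
--     result = [-1] * n
--     for i in range(n-1, 0, -1):
--         for j in range(i-1, -1, -1):
--             if nums[j] > nums[i]:
--                 result[i] = nums[j]
--                 break  #*******dont miss this
--     return result
-- ===== SOURCE B (Python) =====
-- def previous_greater_element_brute_force(nums: list[int]) -> list[int]:
--     stack = []  # values of elements that could still be a previous-greater, top = last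
--     result = []
--     for x in nums:
--         while stack and stack[-1] <= x:
--             stack.pop()
--         result.append(stack[-1] if stack else -1)
--         stack.append(x)
--     return result
-- ===== Notes on version B (the rewrite author's own statement) =====
-- stated objective: faster
-- what changed: Replaced the quadratic backwards scan per index by a single left-to-right pass with a monotonic decreasing stack.
import Mathlib
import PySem

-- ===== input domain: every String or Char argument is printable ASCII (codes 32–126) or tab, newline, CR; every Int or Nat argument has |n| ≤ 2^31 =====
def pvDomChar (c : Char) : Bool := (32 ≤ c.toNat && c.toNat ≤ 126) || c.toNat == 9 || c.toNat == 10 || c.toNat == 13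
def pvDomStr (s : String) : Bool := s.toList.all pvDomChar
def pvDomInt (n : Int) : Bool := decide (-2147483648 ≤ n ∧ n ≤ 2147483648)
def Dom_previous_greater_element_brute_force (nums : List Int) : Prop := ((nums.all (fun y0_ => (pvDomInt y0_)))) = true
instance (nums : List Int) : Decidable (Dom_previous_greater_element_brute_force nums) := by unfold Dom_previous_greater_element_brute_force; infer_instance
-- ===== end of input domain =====

-- B replaces A's quadratic backwards scan per index by a single left-to-right pass with a
-- monotonic stack (objective: faster, O(n) instead of O(n^2)).

-- ===== PORT A =====
-- inner loop 'for j in range(i-1, -1, -1): if nums[j] > nums[i]: result[i] = nums[j]; break'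
def pvInnerA (nums : List Int) (i : Int) (result : List Int) (js : List Int) : List Int :=
  match js with
  | [] => result
  | j :: rest =>
    if PySem.List.pyGetD nums j 0 > PySem.List.pyGetD nums i 0 then
      PySem.List.pySetD result i (PySem.List.pyGetD nums j 0)
    else pvInnerA nums i result rest

-- outer loop 'for i in range(n-1, 0, -1)'
def pvOuterA (nums : List Int) (result : List Int) (is_ : List Int) : List Int :=
  match is_ with
  | [] => result
  | i :: rest => pvOuterA nums (pvInnerA nums i result (PySem.List.pyRange (i - 1) (-1) (-1))) rest

def previous_greater_element_brute_force (nums : List Int) : List Int :=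
  let n := nums.length
  pvOuterA nums (List.replicate n (-1)) (PySem.List.pyRange ((n : Int) - 1) 0 (-1))

-- ===== PORT B =====
-- 'while stack and stack[-1] <= x: stack.pop()'  (stack is kept top-first: head = stack[-1])
def pvPopLE (stack : List Int) (x : Int) : List Int :=
  match stack with
  | [] => []
  | t :: rest => if t ≤ x then pvPopLE rest x else t :: rest

-- 'for x in nums: …; result.append(stack[-1] if stack else -1); stack.append(x)'
def pvLoopB (xs : List Int) (stack : List Int) (acc : List Int) : List Int :=
  match xs with
  | [] => acc
  | x :: rest =>
    let s := pvPopLE stack x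
    let r := match s with | t :: _ => t | [] => (-1 : Int)
    pvLoopB rest (x :: s) (acc ++ [r])

def previous_greater_element_brute_force_alt (nums : List Int) : List Int :=
  pvLoopB nums [] []

-- ===== PRECONDITION & SPEC =====
def Spec_previous_greater_element_brute_force (nums : List Int) (out : List Int) : Prop := out = previous_greater_element_brute_force_alt nums
instance (nums : List Int) (out : List Int) : Decidable (Spec_previous_greater_element_brute_force nums out) := by unfold Spec_previous_greater_element_brute_force; infer_instance

-- ===== CLAIM (what is proved, stated in full; the proofs are below) =====
def Claim_equal_previous_greater_element_brute_force : Prop := ∀ (nums : List Int), Dom_previous_greater_element_brute_force nums → Spec_previous_greater_element_brute_force nums (previous_greater_element_brute_force nums)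

-- ===== LEMMAS AND PROOFS =====

-- first value greater than x in l, scanning front to back; -1 if none
def pvFindG : List Int → Int → Int
  | [], _ => -1
  | a :: t, x => if a > x then a else pvFindG t x

-- the common specification: result for index k
def pvSpecAt (nums : List Int) (k : Nat) : Int :=
  pvFindG ((nums.take k).reverse) (nums.getD k 0)

-- reference list, built prefix by prefix (p = processed prefix)
def pvSpecAux (p xs : List Int) : List Int :=
  match xs with
  | [] => []
  | x :: rest => pvFindG p.reverse x :: pvSpecAux (p ++ [x]) rest

lemma pvSpecAux_get? (xs : List Int) : ∀ (p : List Int) (k : Nat),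
    (pvSpecAux p xs)[k]? =
      if k < xs.length then some (pvFindG ((p ++ xs.take k).reverse) (xs.getD k 0)) else none := by
  induction xs with
  | nil => intro p k; simp [pvSpecAux]
  | cons x rest ih =>
    intro p k
    cases k with
    | zero => simp [pvSpecAux]
    | succ k =>
      simp only [pvSpecAux, List.getElem?_cons_succ, ih (p ++ [x]) k, List.length_cons,
        List.take_succ_cons, List.getD_cons_succ]
      simp [List.append_assoc]

-- popping elements ≤ x does not change the first element greater than y, for y ≥ x
lemma pvFindG_popLE (s : List Int) (x y : Int) (h : x ≤ y) :
    pvFindG (pvPopLE s x) y = pvFindG s y := by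
  induction s with
  | nil => rfl
  | cons a t ih =>
    by_cases ha : a ≤ x
    · have : ¬ a > y := by omega
      simp [pvPopLE, pvFindG, ha, this, ih]
    · simp [pvPopLE, ha]

-- the element reported by B at each step is the first element of the stack greater than x
lemma pvPopLE_head (s : List Int) (x : Int) :
    (match pvPopLE s x with | t :: _ => t | [] => (-1 : Int)) = pvFindG s x := by
  induction s with
  | nil => rfl
  | cons a t ih =>
    by_cases ha : a ≤ x
    · have : ¬ a > x := by omega
      simp [pvPopLE, pvFindG, ha, this, ih]
    · have : a > x := by omega
      simp [pvPopLE, pvFindG, ha, this]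

lemma pvLoopB_eq (xs : List Int) : ∀ (stack acc p : List Int),
    (∀ y, pvFindG stack y = pvFindG p.reverse y) →
    pvLoopB xs stack acc = acc ++ pvSpecAux p xs := by
  induction xs with
  | nil => intro stack acc p _; simp [pvLoopB, pvSpecAux]
  | cons x rest ih =>
    intro stack acc p hinv
    have hr : (match pvPopLE stack x with | t :: _ => t | [] => (-1 : Int))
        = pvFindG p.reverse x := by rw [pvPopLE_head, hinv]
    have hinv' : ∀ y, pvFindG (x :: pvPopLE stack x) y = pvFindG ((p ++ [x]).reverse) y := by
      intro y
      simp only [List.reverse_append, List.reverse_singleton, List.singleton_append]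
      by_cases hxy : x > y
      · simp [pvFindG, hxy]
      · have hle : x ≤ y := by omega
        simp [pvFindG, hxy, pvFindG_popLE stack x y hle, hinv y]
    simp only [pvLoopB, pvSpecAux]
    rw [hr, ih (x :: pvPopLE stack x) (acc ++ [pvFindG p.reverse x]) (p ++ [x]) hinv']
    simp

lemma pvAlt_get? (nums : List Int) (k : Nat) :
    (previous_greater_element_brute_force_alt nums)[k]? =
      if k < nums.length then some (pvSpecAt nums k) else none := by
  have h := pvLoopB_eq nums [] [] [] (by intro y; rfl)
  simp only [previous_greater_element_brute_force_alt, h, List.nil_append]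
  rw [pvSpecAux_get? nums [] k]
  simp [pvSpecAt]

-- ===== A-side lemmas =====

lemma pvInnerA_eq (nums : List Int) (i : Int) (hi0 : 0 ≤ i) (hi : i.toNat < nums.length) :
    ∀ (js : List Int) (result : List Int),
    result[i.toNat]? = some (-1) →
    pvInnerA nums i result js =
      result.set i.toNat
        (pvFindG (js.map (fun j => PySem.List.pyGetD nums j 0)) (PySem.List.pyGetD nums i 0)) := by
  intro js
  induction js with
  | nil =>
    intro result hres
    simp only [pvInnerA, List.map_nil, pvFindG]
    apply List.ext_getElem?
    intro m
    by_cases hm : m = i.toNat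
    · subst hm
      rw [List.getElem?_set_self' ]
      · rw [hres]; simp
    · rw [List.getElem?_set_ne (by omega)]
  | cons j rest ih =>
    intro result hres
    simp only [pvInnerA, List.map_cons, pvFindG]
    by_cases hgt : PySem.List.pyGetD nums j 0 > PySem.List.pyGetD nums i 0
    · have hset : PySem.List.pySetD result i (PySem.List.pyGetD nums j 0)
          = result.set i.toNat (PySem.List.pyGetD nums j 0) :=
        PySem.List.pySetD_of_nonneg hi0 (xs := result) (v := PySem.List.pyGetD nums j 0)
      simp [hgt, hset]
    · simp [hgt, ih result hres]

lemma pvRange_map_eq (nums : List Int) : ∀ (i : Nat), i ≤ nums.length →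
    (PySem.List.pyRange ((i : Int) - 1) (-1) (-1)).map (fun j => PySem.List.pyGetD nums j 0)
      = (nums.take i).reverse := by
  intro i
  induction i with
  | zero =>
    intro _
    rw [PySem.List.pyRange_neg_one_eq_nil (by omega)]
    simp
  | succ i ih =>
    intro hle
    have h1 : ((i + 1 : Nat) : Int) - 1 = (i : Int) := by push_cast; ring
    rw [h1, PySem.List.pyRange_neg_one_cons (by omega)]
    simp only [List.map_cons, ih (by omega)]
    have hi : i < nums.length := by omega
    have h2 : PySem.List.pyGetD nums (i : Int) 0 = nums[i] := by
      simpa using PySem.List.pyGetD_eq_getElem (xs := nums) (i := (i : Int)) (d := 0)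
        (by omega) (by push_cast; omega)
    rw [h2]
    have h3 : nums.take (i + 1) = nums.take i ++ [nums[i]] := by
      rw [List.take_succ]
      simp [hi]
    rw [h3, List.reverse_append]
    simp

lemma pvOuterA_get? (nums : List Int) :
    ∀ (is_ : List Int) (result : List Int),
    (∀ i ∈ is_, 0 ≤ i ∧ i.toNat < nums.length) → is_.Nodup →
    (∀ i ∈ is_, result[i.toNat]? = some (-1)) →
    ∀ (k : Nat),
    (pvOuterA nums result is_)[k]? =
      if (k : Int) ∈ is_ then some (pvSpecAt nums k) else result[k]? := by
  intro is_
  induction is_ with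
  | nil => intro result _ _ _ k; simp [pvOuterA]
  | cons i rest ih =>
    intro result hbnd hnd hres k
    obtain ⟨hi0, hi⟩ := hbnd i (by simp)
    have hICast : ((i.toNat : Nat) : Int) = i := Int.toNat_of_nonneg hi0
    have hres' : pvInnerA nums i result (PySem.List.pyRange (i - 1) (-1) (-1)) =
        result.set i.toNat (pvSpecAt nums i.toNat) := by
      rw [pvInnerA_eq nums i hi0 hi _ result (hres i (by simp))]
      have hrg : (PySem.List.pyRange (i - 1) (-1) (-1)).map (fun j => PySem.List.pyGetD nums j 0)
          = (nums.take i.toNat).reverse := by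
        have := pvRange_map_eq nums i.toNat (le_of_lt hi)
        rwa [hICast] at this
      rw [hrg]
      have h2 : PySem.List.pyGetD nums i 0 = nums.getD i.toNat 0 := by
        have ha := PySem.List.pyGetD_eq_getElem (xs := nums) (i := i) (d := 0)
          hi0 (by omega)
        rw [ha, List.getD_eq_getElem nums 0 hi]
      rw [h2]
      rfl
    have hnd' : rest.Nodup := (List.nodup_cons.mp hnd).2
    have hnotmem : i ∉ rest := (List.nodup_cons.mp hnd).1
    have hbnd' : ∀ i' ∈ rest, 0 ≤ i' ∧ i'.toNat < nums.length := fun i' h => hbnd i' (by simp [h])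
    have hres2 : ∀ i' ∈ rest,
        (result.set i.toNat (pvSpecAt nums i.toNat))[i'.toNat]? = some (-1) := by
      intro i' h
      obtain ⟨hi'0, _⟩ := hbnd' i' h
      have hne : i'.toNat ≠ i.toNat := by
        intro hEq
        apply hnotmem
        have : i' = i := by omega
        rwa [this] at h
      rw [List.getElem?_set_ne (by omega)]
      exact hres i' (by simp [h])
    simp only [pvOuterA, hres']
    rw [ih _ hbnd' hnd' hres2 k]
    by_cases hkrest : (k : Int) ∈ rest
    · simp [hkrest]
    · by_cases hki : (k : Int) = i
      · have hk : k = i.toNat := by omega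
        subst hk
        have hlen : i.toNat < result.length :=
          (List.getElem?_eq_some_iff.mp (hres i (by simp))).1
        simp [hkrest, hki, List.getElem?_set_self hlen]
      · have hk : k ≠ i.toNat := by omega
        have : ¬ ((k : Int) ∈ i :: rest) := by simp [hkrest, hki]
        rw [List.getElem?_set_ne (by omega : i.toNat ≠ k)]
        simp [hkrest, this]

lemma pvA_get? (nums : List Int) (k : Nat) :
    (previous_greater_element_brute_force nums)[k]? =
      if k < nums.length then some (pvSpecAt nums k) else none := by
  unfold previous_greater_element_brute_force
  have hnd : (PySem.List.pyRange ((nums.length : Int) - 1) 0 (-1)).Nodup := by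
    rw [PySem.List.pyRange_neg_one_eq_reverse]
    exact List.nodup_reverse.mpr (PySem.List.nodup_pyRange_one _ _)
  have hbnd : ∀ i ∈ PySem.List.pyRange ((nums.length : Int) - 1) 0 (-1),
      0 ≤ i ∧ i.toNat < nums.length := by
    intro i hmem
    rw [PySem.List.mem_pyRange_neg_one] at hmem
    constructor <;> omega
  have hres : ∀ i ∈ PySem.List.pyRange ((nums.length : Int) - 1) 0 (-1),
      (List.replicate nums.length (-1 : Int))[i.toNat]? = some (-1) := by
    intro i hmem
    rw [PySem.List.mem_pyRange_neg_one] at hmem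
    rw [List.getElem?_replicate]
    have : i.toNat < nums.length := by omega
    simp [this]
  rw [pvOuterA_get? nums _ _ hbnd hnd hres k]
  simp only [PySem.List.mem_pyRange_neg_one]
  by_cases hk : k < nums.length
  · by_cases hk0 : k = 0
    · subst hk0
      have : ¬ ((0 : Int) < (0 : Nat) ∧ ((0 : Nat) : Int) ≤ (nums.length : Int) - 1) := by omega
      simp only [Nat.cast_zero, this, if_neg this, List.getElem?_replicate, hk, if_pos hk]
      simp [pvSpecAt, pvFindG]
    · have h2 : (0 : Int) < (k : Int) ∧ (k : Int) ≤ (nums.length : Int) - 1 := by omega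
      rw [if_pos h2, if_pos hk]
  · have h1 : ¬ ((0 : Int) < (k : Int) ∧ (k : Int) ≤ (nums.length : Int) - 1) := by omega
    simp [h1, hk, List.getElem?_replicate]

-- ===== VERDICT (by name: the statement is the Claim_ definition above) =====
theorem previous_greater_element_brute_force_spec : Claim_equal_previous_greater_element_brute_force := by
  intro nums _
  unfold Spec_previous_greater_element_brute_force
  apply List.ext_getElem?
  intro k
  rw [pvA_get?, pvAlt_get?]
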